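-- pv_equiv track=rewrite | github.com/pypi-data/pypi-mirror-105 | packages/delphai-search-utils/delphai-search-utils-0.1.3.tar.gz/delphai-search-utils-0.1.3/delphai_search_utils/utils.py | split_with_indices
-- ===== SOURCE A (Python) =====
-- from itertools import groupby
-- from typing import Tuple, List, Generator
--
-- def split_with_indices(query: str, sep: str = ' ')\
--         -> Generator[Tuple[str, int], None, None]:
--     """ Splits the string by the given separator and returns all tokens
--     together with their character start indices."""
--     p = 0
--     for k, g in groupby(query, lambda x: x == sep):
--         q = p + sum(1 for i in g)
--         if not k:
--             yield query[p:q], p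
--         p = q
-- ===== SOURCE B (Python) =====
-- def split_with_indices(query: str, sep: str = ' '):
--     """Explicit single pass tracking the current token's start index
--     (no groupby): yield (token, start) for each maximal sep-free run."""
--     start = 0
--     for i, ch in enumerate(query):
--         if ch == sep:
--             if i > start:
--                 yield query[start:i], start
--             start = i + 1
--     if len(query) > start:
--         yield query[start:], start
-- ===== Notes on version B (the rewrite author's own statement) =====
-- stated objective: simpler
-- what changed: Replaced the itertools.groupby pass (which materialises (key, group) runs and sums each group's length) with a single explicit character loop that keeps only the current token's start index and slices the query directly.
import Mathlib
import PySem

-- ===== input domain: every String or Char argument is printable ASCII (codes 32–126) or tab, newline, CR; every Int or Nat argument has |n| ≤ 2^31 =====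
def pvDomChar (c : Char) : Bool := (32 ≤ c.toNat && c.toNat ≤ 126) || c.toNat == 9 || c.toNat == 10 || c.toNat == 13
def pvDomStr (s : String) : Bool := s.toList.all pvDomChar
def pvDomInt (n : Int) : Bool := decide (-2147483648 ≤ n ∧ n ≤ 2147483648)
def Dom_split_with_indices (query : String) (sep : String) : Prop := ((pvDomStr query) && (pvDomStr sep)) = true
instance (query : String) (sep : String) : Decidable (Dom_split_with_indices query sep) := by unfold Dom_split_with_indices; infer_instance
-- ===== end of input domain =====

-- B replaces A's itertools.groupby pass by a single explicit character loop that
-- tracks the current token's start index (objective: simpler decomposition, same cost).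

-- ===== PORT A =====
-- itertools.groupby over the characters with key (x == sep): list of
-- (key, group length) pairs over maximal runs of equal key
def pyGroupbyA (f : Char → Bool) : List Char → List (Bool × Nat)
  | [] => []
  | c :: rest =>
    let k := f c
    (k, 1 + (rest.takeWhile (fun x => f x == k)).length)
      :: pyGroupbyA f (rest.dropWhile (fun x => f x == k))
termination_by cs => cs.length
decreasing_by
  simp only [List.length_cons]
  exact Nat.lt_succ_of_le (List.length_dropWhile_le _ _)

-- A's for-loop over groupby's output, carrying p; 'yield' becomes list cons
def loopA (full : List Char) (p : Nat) : List (Bool × Nat) → List (String × Int)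
  | [] => []
  | (k, n) :: gs =>
    let q := p + n
    if k then loopA full q gs
    else (String.ofList (PySem.List.slice full (some (p : Int)) (some (q : Int))), (p : Int))
           :: loopA full q gs

def split_with_indices (query : String) (sep : String) : List (String × Int) :=
  loopA query.toList 0 (pyGroupbyA (fun x => String.ofList [x] == sep) query.toList)

-- ===== PORT B =====
-- 'for i, ch in enumerate(query)' carrying i and start; trailing token on []
def loopB (full : List Char) (sep : String) (i start : Nat) : List Char → List (String × Int)
  | [] =>
    if full.length > start then
      [(String.ofList (PySem.List.slice full (some (start : Int)) none), (start : Int))]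
    else []
  | c :: rest =>
    if String.ofList [c] == sep then
      if i > start then
        (String.ofList (PySem.List.slice full (some (start : Int)) (some (i : Int))), (start : Int))
          :: loopB full sep (i + 1) (i + 1) rest
      else loopB full sep (i + 1) (i + 1) rest
    else loopB full sep (i + 1) start rest

def split_with_indices_alt (query : String) (sep : String) : List (String × Int) :=
  loopB query.toList sep 0 0 query.toList

-- ===== PRECONDITION & SPEC =====
def Spec_split_with_indices (query : String) (sep : String) (out : List (String × Int)) : Prop := out = split_with_indices_alt query sep
instance (query : String) (sep : String) (out : List (String × Int)) : Decidable (Spec_split_with_indices query sep out) := by unfold Spec_split_with_indices; infer_instance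

-- ===== CLAIM (what is proved, stated in full; the proofs are below) =====
def Claim_equal_split_with_indices : Prop := ∀ (query : String) (sep : String), Dom_split_with_indices query sep → Spec_split_with_indices query sep (split_with_indices query sep)

-- ===== LEMMAS AND PROOFS =====

theorem loopA_sep_head (full : List Char) (f : Char → Bool) (rest : List Char)
    (p : Nat) (c : Char) (hc : f c = true) :
    loopA full p (pyGroupbyA f (c :: rest)) = loopA full (p + 1) (pyGroupbyA f rest) := by
  cases rest with
  | nil => simp [pyGroupbyA, loopA, hc]
  | cons c' rest' =>
    by_cases hc' : f c' = true
    · simp only [pyGroupbyA, hc, hc', loopA, List.takeWhile, List.dropWhile, beq_self_eq_true, if_true, List.length_cons]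
      congr 1
      omega
    · have hc'' : f c' = false := by simpa using hc'
      conv_lhs => simp only [pyGroupbyA, List.takeWhile, List.dropWhile, hc]
      rw [show (f c' == true) = false by simp [hc'']]
      simp [loopA]

theorem loopB_nonsep_run (full : List Char) (sep : String) (g rest : List Char)
    (start : Nat) (hg : ∀ c ∈ g, (String.ofList [c] == sep) = false) :
    ∀ i, loopB full sep i start (g ++ rest) = loopB full sep (i + g.length) start rest := by
  induction g with
  | nil => intro i; simp
  | cons c g' ih =>
    intro i
    simp only [List.cons_append, loopB, hg c (by simp), Bool.false_eq_true, if_false]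
    rw [ih (fun x hx => hg x (by simp [hx])) (i + 1)]
    have h : i + 1 + g'.length = i + (c :: g').length := by
      simp only [List.length_cons]; omega
    rw [h]

theorem main_lemma (full : List Char) (sep : String) :
    ∀ n cs p, cs.length ≤ n → cs = full.drop p →
      loopA full p (pyGroupbyA (fun x => String.ofList [x] == sep) cs) = loopB full sep p p cs := by
  intro n
  induction n with
  | zero =>
    intro cs p hlen hdrop
    have hnil : cs = [] := List.eq_nil_of_length_eq_zero (Nat.le_zero.mp hlen)
    subst hnil
    have hlenfull : full.length ≤ p := by
      by_contra h
      exact absurd hdrop.symm (by simp [List.drop_eq_nil_iff]; omega)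
    simp [pyGroupbyA, loopA, loopB]
    omega
  | succ n ih =>
    intro cs p hlen hdrop
    cases cs with
    | nil =>
      have hlenfull : full.length ≤ p := by
        by_contra h
        exact absurd hdrop.symm (by simp [List.drop_eq_nil_iff]; omega)
      simp [pyGroupbyA, loopA, loopB]
      omega
    | cons c rest =>
      have hplt : p < full.length := by
        by_contra h
        have : full.drop p = [] := by simp [List.drop_eq_nil_iff]; omega
        rw [this] at hdrop; exact absurd hdrop (by simp)
      have hrest : rest = full.drop (p + 1) := by
        have : full.drop (p + 1) = (full.drop p).drop 1 := by
          rw [List.drop_drop]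
        rw [this, ← hdrop]; simp
      have hlen2 : rest.length + 1 ≤ n + 1 := by simpa using hlen
      by_cases hc : (String.ofList [c] == sep) = true
      · rw [loopA_sep_head full _ rest p c hc]
        have hB : loopB full sep p p (c :: rest) = loopB full sep (p + 1) (p + 1) rest := by
          simp [loopB, hc]
        rw [hB]
        exact ih rest (p + 1) (by omega) hrest
      · -- non-separator head
        have hcf : (String.ofList [c] == sep) = false := by simpa using hc
        set f : Char → Bool := fun x => String.ofList [x] == sep with hf
        set t := rest.takeWhile (fun x => !f x) with ht
        set d := rest.dropWhile (fun x => !f x) with hd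
        have hrestsplit : rest = t ++ d := (List.takeWhile_append_dropWhile).symm
        have hA : loopA full p (pyGroupbyA f (c :: rest)) =
            (String.ofList (PySem.List.slice full (some (p : Int)) (some ((p + (1 + t.length) : Nat) : Int))), (p : Int))
              :: loopA full (p + (1 + t.length)) (pyGroupbyA f d) := by
          conv_lhs => simp only [pyGroupbyA]
          simp only [show f c = false from hcf]
          simp [loopA]
          exact ⟨rfl, rfl⟩
        have htall : ∀ x ∈ t, (String.ofList [x] == sep) = false := by
          intro x hx
          have := List.mem_takeWhile_imp hx
          simpa [hf] using this
        have hB : loopB full sep p p (c :: rest) = loopB full sep (p + 1 + t.length) p d := by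
          simp only [loopB, hcf, Bool.false_eq_true, if_false]
          rw [hrestsplit]
          exact loopB_nonsep_run full sep t d p htall (p + 1)
        rw [hA, hB]
        have harith0 : p + (1 + t.length) = p + 1 + t.length := by omega
        rw [harith0]
        cases hD : d with
        | nil =>
          have hfull : full.length = p + 1 + t.length := by
            have h1 : rest.length = t.length := by rw [hrestsplit, hD]; simp
            have h2 : (full.drop p).length = rest.length + 1 := by rw [← hdrop]; simp
            simp only [List.length_drop] at h2
            omega
          simp only [loopB, pyGroupbyA, loopA]
          rw [if_pos (by omega)]
          have hsl : PySem.List.slice full (some (p : Int)) (some ((p + 1 + t.length : Nat) : Int)) =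
              PySem.List.slice full (some (p : Int)) none := by
            rw [PySem.List.slice_from_natCast]
            have hcast : ((p + 1 + t.length : Nat) : Int) = (p : Int) + ((1 + t.length : Nat) : Int) := by
              push_cast; ring
            rw [hcast, PySem.List.slice_natCast_add]
            exact List.take_of_length_le (by simp only [List.length_drop]; omega)
          rw [hsl]
        | cons c' d' =>
          have h5 : rest.dropWhile (fun x => !f x) = c' :: d' := by rw [← hd, hD]
          have hc' : f c' = true := by
            have := List.head_dropWhile_not (p := fun x => !f x) (l := rest)
              (by rw [h5]; simp)
            simp [h5] at this
            simpa using this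
          have hA2 : loopA full (p + 1 + t.length) (pyGroupbyA f (c' :: d')) =
              loopA full (p + 1 + t.length + 1) (pyGroupbyA f d') :=
            loopA_sep_head full f d' _ c' hc'
          have hB2 : loopB full sep (p + 1 + t.length) p (c' :: d') =
              (String.ofList (PySem.List.slice full (some (p : Int)) (some ((p + 1 + t.length : Nat) : Int))), (p : Int))
                :: loopB full sep (p + 1 + t.length + 1) (p + 1 + t.length + 1) d' := by
            simp only [loopB]
            rw [if_pos (show (String.ofList [c'] == sep) = true by simpa [hf] using hc'),
                if_pos (by omega : p + 1 + t.length > p)]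
          rw [hA2, hB2]
          have hd' : d' = full.drop (p + 1 + t.length + 1) := by
            have h2 : full.drop (p + 1 + t.length + 1) = (full.drop (p + 1)).drop (t.length + 1) := by
              rw [List.drop_drop]; congr 1
            rw [h2, ← hrest, hrestsplit, hD]
            simp [List.drop_append]
          have hlen' : d'.length ≤ n := by
            have h3 : rest.length = t.length + 1 + d'.length := by
              rw [hrestsplit, hD]
              simp only [List.length_append, List.length_cons]
              omega
            omega
          have hrec := ih d' (p + 1 + t.length + 1) hlen' hd'
          rw [hrec]

-- ===== VERDICT (by name: the statement is the Claim_ definition above) =====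
theorem split_with_indices_spec : Claim_equal_split_with_indices := by
  intro query sep _
  unfold Spec_split_with_indices split_with_indices split_with_indices_alt
  exact main_lemma query.toList sep query.toList.length query.toList 0 le_rfl rfl
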